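-- pv_equiv track=rewrite | github.com/ThePickleGawd/EmToM | emtom/scripts/campaign.py | _derive_runs
-- ===== SOURCE A (Python) =====
-- from typing import Any, Dict, List, Optional, Set, Tuple
--
-- def _derive_runs(
--     models: List[str],
--     modes: List[str],
--     matchups: List[Tuple[str, str]],
-- ) -> Dict[str, Dict[str, Any]]:
--     """Derive the full set of run keys from models, modes, and matchups."""
--     runs: Dict[str, Dict[str, Any]] = {}
--
--     for model in models:
--         for mode in modes:
--             # Cooperative and mixed: one run each
--             for cat in ["cooperative", "mixed"]:
--                 key = f"{model}_{mode}_{cat}"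
--                 runs[key] = {
--                     "model": model,
--                     "mode": mode,
--                     "category": cat,
--                     "type": "solo",
--                     "status": "pending",
--                 }
--
--             # Competitive: matchup runs
--             for model_a, model_b in matchups:
--                 if model not in (model_a, model_b):
--                     continue
--                 # Only generate from the pair once (the loop over models would double it)
--                 if model != model_a:
--                     continue
--                 for direction in ["forward", "swap"]:
--                     if direction == "forward":
--                         t0, t1 = model_a, model_b
--                     else:
--                         t0, t1 = model_b, model_a
--                     key = f"{model_a}_vs_{model_b}_{mode}_competitive"
--                     if direction == "swap":
--                         key += "_swap"
--                     runs[key] = {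
--                         "model_a": model_a,
--                         "model_b": model_b,
--                         "team_0": t0,
--                         "team_1": t1,
--                         "mode": mode,
--                         "category": "competitive",
--                         "type": "matchup",
--                         "direction": direction,
--                         "status": "pending",
--                     }
--
--     return runs
-- ===== SOURCE B (Python) =====
-- def _derive_runs(models, modes, matchups):
--     """Derive the full set of run keys; matchups are pre-grouped by model_a."""
--     by_a = {}
--     for a, b in matchups:
--         by_a[a] = by_a.get(a, []) + [b]
--     runs = {}
--     for model in models:
--         opponents = by_a.get(model, [])
--         for mode in modes:
--             for cat in ("cooperative", "mixed"):
--                 runs[f"{model}_{mode}_{cat}"] = {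
--                     "model": model,
--                     "mode": mode,
--                     "category": cat,
--                     "type": "solo",
--                     "status": "pending",
--                 }
--             for opp in opponents:
--                 base = f"{model}_vs_{opp}_{mode}_competitive"
--                 runs[base] = {
--                     "model_a": model,
--                     "model_b": opp,
--                     "team_0": model,
--                     "team_1": opp,
--                     "mode": mode,
--                     "category": "competitive",
--                     "type": "matchup",
--                     "direction": "forward",
--                     "status": "pending",
--                 }
--                 runs[base + "_swap"] = {
--                     "model_a": model,
--                     "model_b": opp,
--                     "team_0": opp,
--                     "team_1": model,
--                     "mode": mode,
--                     "category": "competitive",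
--                     "type": "matchup",
--                     "direction": "swap",
--                     "status": "pending",
--                 }
--     return runs
-- ===== Notes on version B (the rewrite author's own statement) =====
-- stated objective: faster
-- what changed: B pre-groups matchups by model_a into a dict in one pass, so each model scans only its own opponents instead of rescanning all matchups for every (model, mode) pair.
import Mathlib
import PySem

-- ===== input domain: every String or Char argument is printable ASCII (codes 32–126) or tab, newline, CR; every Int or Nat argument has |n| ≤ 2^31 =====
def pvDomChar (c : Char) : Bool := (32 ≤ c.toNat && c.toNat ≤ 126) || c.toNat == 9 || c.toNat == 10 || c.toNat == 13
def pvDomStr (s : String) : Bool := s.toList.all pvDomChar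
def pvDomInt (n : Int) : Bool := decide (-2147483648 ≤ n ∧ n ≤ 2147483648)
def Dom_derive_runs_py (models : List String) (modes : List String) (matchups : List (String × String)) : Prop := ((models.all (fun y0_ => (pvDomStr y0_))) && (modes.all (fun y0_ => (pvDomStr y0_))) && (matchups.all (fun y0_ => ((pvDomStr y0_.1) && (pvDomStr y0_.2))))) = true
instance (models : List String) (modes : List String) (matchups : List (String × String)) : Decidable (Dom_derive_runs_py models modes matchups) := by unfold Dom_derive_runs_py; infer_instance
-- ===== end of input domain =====

-- B pre-groups matchups by model_a once, so the per-(model, mode) work scans only that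
-- model's opponents; equal return value (insertion order included), asymptotically faster.

-- ===== PORT A =====
-- literal transliteration of A: triple nested loop, competitive runs found by
-- scanning ALL matchups for every (model, mode) pair; dict literals inlined as in A.
def derive_runs_py (models : List String) (modes : List String) (matchups : List (String × String)) : List (String × List (String × String)) :=
  (models.foldl (fun runs model =>
    modes.foldl (fun runs mode =>
      let runs := ["cooperative", "mixed"].foldl (fun runs cat =>
        runs.insert (model ++ "_" ++ mode ++ "_" ++ cat)
          [("model", model), ("mode", mode), ("category", cat),
           ("type", "solo"), ("status", "pending")]) runs
      matchups.foldl (fun runs p =>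
        let model_a := p.1
        let model_b := p.2
        if ¬ (model = model_a ∨ model = model_b) then runs
        else if model ≠ model_a then runs
        else
          ["forward", "swap"].foldl (fun runs direction =>
            let t := if direction = "forward" then (model_a, model_b) else (model_b, model_a)
            let key0 := model_a ++ "_vs_" ++ model_b ++ "_" ++ mode ++ "_competitive"
            let key := if direction = "swap" then key0 ++ "_swap" else key0
            runs.insert key
              [("model_a", model_a), ("model_b", model_b), ("team_0", t.1), ("team_1", t.2),
               ("mode", mode), ("category", "competitive"), ("type", "matchup"),
               ("direction", direction), ("status", "pending")]) runs) runs) runs)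
    (PySem.Dict.empty : PySem.Dict String (List (String × String)))).items

-- ===== PORT B =====
-- B-side helper: one competitive run record
def pvCompRun (ma mb t0 t1 mode direction : String) : List (String × String) :=
  [("model_a", ma), ("model_b", mb), ("team_0", t0), ("team_1", t1),
   ("mode", mode), ("category", "competitive"), ("type", "matchup"),
   ("direction", direction), ("status", "pending")]

def derive_runs_py_alt (models : List String) (modes : List String) (matchups : List (String × String)) : List (String × List (String × String)) :=
  let by_a := matchups.foldl (fun d p => d.modify p.1 [] (· ++ [p.2]))
    (PySem.Dict.empty : PySem.Dict String (List String))
  (models.foldl (fun runs model =>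
    let opponents := by_a.getD model []
    modes.foldl (fun runs mode =>
      let runs := ["cooperative", "mixed"].foldl (fun runs cat =>
        runs.insert (model ++ "_" ++ mode ++ "_" ++ cat)
          [("model", model), ("mode", mode), ("category", cat),
           ("type", "solo"), ("status", "pending")]) runs
      opponents.foldl (fun runs opp =>
        let base := model ++ "_vs_" ++ opp ++ "_" ++ mode ++ "_competitive"
        (runs.insert base (pvCompRun model opp model opp mode "forward")).insert
          (base ++ "_swap") (pvCompRun model opp opp model mode "swap")) runs) runs)
    (PySem.Dict.empty : PySem.Dict String (List (String × String)))).items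

-- ===== PRECONDITION & SPEC =====
def Spec_derive_runs_py (models : List String) (modes : List String) (matchups : List (String × String)) (out : List (String × List (String × String))) : Prop := out = derive_runs_py_alt models modes matchups
instance (models : List String) (modes : List String) (matchups : List (String × String)) (out : List (String × List (String × String))) : Decidable (Spec_derive_runs_py models modes matchups out) := by unfold Spec_derive_runs_py; infer_instance

-- ===== CLAIM (what is proved, stated in full; the proofs are below) =====
def Claim_equal_derive_runs_py : Prop := ∀ (models : List String) (modes : List String) (matchups : List (String × String)), Dom_derive_runs_py models modes matchups → Spec_derive_runs_py models modes matchups (derive_runs_py models modes matchups)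

-- ===== LEMMAS AND PROOFS =====

-- folding the filtered-and-projected matchup list equals folding the full list with
-- A's membership test in the body
theorem pv_foldl_filter {β : Type} (l : List (String × String)) (m : String)
    (f : β → String → β) (init : β) :
    l.foldl (fun acc p => if m = p.1 then f acc p.2 else acc) init
      = ((l.filter (fun p => p.1 == m)).map (·.2)).foldl f init := by
  induction l generalizing init with
  | nil => rfl
  | cons p l ih =>
      by_cases h : m = p.1
      · rw [List.foldl_cons, if_pos h, List.filter_cons,
          if_pos (show (p.1 == m) = true by simp [h]), List.map_cons, List.foldl_cons]
        exact ih (f init p.2)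
      · rw [List.foldl_cons, if_neg h, List.filter_cons,
          if_neg (show ¬ (p.1 == m) = true by simp only [beq_iff_eq]; exact fun e => h e.symm)]
        exact ih init

-- A's inner matchup loop body collapses to the single test 'model = p.1'
theorem pv_body_eq (runs : PySem.Dict String (List (String × String)))
    (model mode : String) (p : String × String) :
    (let model_a := p.1
     let model_b := p.2
     if ¬ (model = model_a ∨ model = model_b) then runs
     else if model ≠ model_a then runs
     else
       ["forward", "swap"].foldl (fun runs direction =>
         let t := if direction = "forward" then (model_a, model_b) else (model_b, model_a)
         let key0 := model_a ++ "_vs_" ++ model_b ++ "_" ++ mode ++ "_competitive"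
         let key := if direction = "swap" then key0 ++ "_swap" else key0
         runs.insert key
           [("model_a", model_a), ("model_b", model_b), ("team_0", t.1), ("team_1", t.2),
            ("mode", mode), ("category", "competitive"), ("type", "matchup"),
            ("direction", direction), ("status", "pending")]) runs)
    = (if model = p.1 then
        (runs.insert (model ++ "_vs_" ++ p.2 ++ "_" ++ mode ++ "_competitive")
          (pvCompRun model p.2 model p.2 mode "forward")).insert
          ((model ++ "_vs_" ++ p.2 ++ "_" ++ mode ++ "_competitive") ++ "_swap")
          (pvCompRun model p.2 p.2 model mode "swap")
      else runs) := by
  by_cases h : model = p.1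
  · subst h
    simp [List.foldl, pvCompRun]
  · rw [if_neg h]
    by_cases h2 : model = p.2
    · subst h2
      simp [h]
    · simp [h, h2]

-- ===== VERDICT (by name: the statement is the Claim_ definition above) =====
theorem derive_runs_py_spec : Claim_equal_derive_runs_py := by
  intro models modes matchups _
  unfold Spec_derive_runs_py derive_runs_py derive_runs_py_alt
  congr 1
  apply PySem.List.foldl_congr_mem
  intro runs model hmodel
  apply PySem.List.foldl_congr_mem
  intro runs2 mode hmode
  simp only
  rw [PySem.Dict.getD_foldl_modify_append, PySem.Dict.getD_empty]
  simp only [List.nil_append]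
  rw [← pv_foldl_filter]
  apply PySem.List.foldl_congr_mem
  intro r p hp
  exact pv_body_eq r model mode p
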